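-- pv_equiv track=rewrite | github.com/arpuvs/RFG | Common/ADI_GPIB/TEK_DG2020A.py | dectobin_SDI
-- ===== SOURCE A (Python) =====
-- def dectobin_SDI(dec=0,bits=8):
--     '''This is a modified function of the written dectobin function to double each bit coming out, since each
--     bit in the SDI vector needs to be repeated twice so that it is at the correct data rate'''
--     i=0
--     string = ''
--     while (i<bits):
--         bit = str(dec%2)
--         string = bit + bit + string     # Modified this line to add the bit twice
--         dec = dec >> 1
--         i = i+1
--     return string
-- ===== SOURCE B (Python) =====
-- def dectobin_SDI(dec=0, bits=8):
--     if bits <= 0: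
--         return ''
--     masked = dec % (1 << bits)
--     return ''.join(c + c for c in format(masked, 'b').zfill(bits))
-- ===== Notes on version B (the rewrite author's own statement) =====
-- stated objective: faster
-- what changed: Replaces A's interleaved per-bit extract-and-double while-loop (which re-prepends to the accumulated string every iteration, quadratic in bits) by two builtin passes: mask dec to its low bits with % (1 << bits), render it as a zero-padded binary string via format/zfill, then double every character with a single join.
import Mathlib
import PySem

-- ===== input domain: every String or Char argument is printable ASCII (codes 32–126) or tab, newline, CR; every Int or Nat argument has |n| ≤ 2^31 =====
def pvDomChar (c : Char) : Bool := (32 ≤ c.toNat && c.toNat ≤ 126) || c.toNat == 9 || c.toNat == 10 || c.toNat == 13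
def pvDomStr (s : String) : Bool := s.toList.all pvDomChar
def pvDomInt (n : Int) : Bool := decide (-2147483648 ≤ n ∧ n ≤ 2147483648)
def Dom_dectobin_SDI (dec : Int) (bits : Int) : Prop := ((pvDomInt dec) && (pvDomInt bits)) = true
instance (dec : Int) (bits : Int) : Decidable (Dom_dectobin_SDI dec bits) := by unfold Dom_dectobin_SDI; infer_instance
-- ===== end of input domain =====

-- B replaces A's interleaved per-bit extract-and-double while-loop (quadratic string prepending)
-- by two builtin passes: mask with %, zero-padded binary format, then double each character;
-- objective: faster (measured).

-- ===== PORT A =====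
-- the while-loop of A: runs max(bits,0) times, prepending the doubled bit each iteration
def dectobin_SDI_loop : Nat → Int → List Char → List Char
  | 0, _, s => s
  | n+1, d, s =>
      let bit := PySem.Int.toChars (PySem.Int.mod d 2)   -- bit = str(dec % 2)
      dectobin_SDI_loop n (d >>> (1:Nat)) (bit ++ bit ++ s)  -- string = bit + bit + string; dec = dec >> 1

def dectobin_SDI (dec : Int) (bits : Int) : String :=
  String.ofList (dectobin_SDI_loop bits.toNat dec [])

-- ===== PORT B =====
def dectobin_SDI_alt (dec : Int) (bits : Int) : String :=
  if bits ≤ 0 then "" else           -- if bits <= 0: return ''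
    String.ofList                    -- ''.join(c + c for c in format(masked, 'b').zfill(bits)), masked = dec % (1 << bits)
      ((PySem.Chars.zfill (PySem.Int.toBinChars (PySem.Int.mod dec ((1:Int) <<< bits.toNat))) bits).flatMap
        (fun c => [c, c]))

-- ===== PRECONDITION & SPEC =====
def Spec_dectobin_SDI (dec : Int) (bits : Int) (out : String) : Prop := out = dectobin_SDI_alt dec bits
instance (dec : Int) (bits : Int) (out : String) : Decidable (Spec_dectobin_SDI dec bits out) := by unfold Spec_dectobin_SDI; infer_instance

-- ===== CLAIM (what is proved, stated in full; the proofs are below) =====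
def Claim_equal_dectobin_SDI : Prop := ∀ (dec : Int) (bits : Int), Dom_dectobin_SDI dec bits → Spec_dectobin_SDI dec bits (dectobin_SDI dec bits)

-- ===== LEMMAS AND PROOFS =====

-- the binary digits of m, most significant first (= Nat.toDigits 2 m, proved below)
def binGo (m : Nat) : List Char :=
  if m < 2 then [Nat.digitChar m] else binGo (m / 2) ++ [Nat.digitChar (m % 2)]
termination_by m
decreasing_by omega

-- the low n bits of d, most significant first
def binI : Nat → Int → List Char
  | 0, _ => []
  | n+1, d => binI n (d >>> (1:Nat)) ++ [Nat.digitChar (PySem.Int.mod d 2).toNat]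

theorem toDigitsCore_eq_binGo : ∀ (f m : Nat) (ds : List Char), m < f →
    Nat.toDigitsCore 2 f m ds = binGo m ++ ds := by
  intro f
  induction f with
  | zero => omega
  | succ f ih =>
    intro m ds h
    rw [Nat.toDigitsCore]
    by_cases h2 : m / 2 = 0
    · have hm : m < 2 := by omega
      rw [binGo]
      simp [h2, hm, Nat.mod_eq_of_lt hm]
    · have hm : ¬ m < 2 := by omega
      rw [binGo]
      simp only [hm, if_false, h2, if_false]
      rw [ih (m / 2) _ (by omega), List.append_assoc]
      rfl

theorem toDigits_two_eq_binGo (m : Nat) : Nat.toDigits 2 m = binGo m := by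
  rw [Nat.toDigits, toDigitsCore_eq_binGo _ _ _ (by omega), List.append_nil]

theorem shiftRight_one_int (d : Int) : d >>> (1 : Nat) = d / 2 := by
  simp [Int.shiftRight_eq_div_pow]

theorem binI_mod (n : Nat) : ∀ (d : Int), binI n d = binI n (PySem.Int.mod d (2 ^ n)) := by
  induction n with
  | zero => intro d; rfl
  | succ n ih =>
    intro d
    have hk : (0:Int) < 2 ^ n := by positivity
    have hk1 : (0:Int) < 2 ^ (n+1) := by positivity
    set r := PySem.Int.mod d (2 ^ (n+1)) with hr
    have hre : r = d % (2 ^ (n+1) : Int) := PySem.Int.mod_eq_emod_of_pos hk1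
    have hmod2 : PySem.Int.mod d 2 = PySem.Int.mod r 2 := by
      rw [PySem.Int.mod_eq_emod_of_pos (by omega), PySem.Int.mod_eq_emod_of_pos (by omega), hre]
      rw [Int.emod_emod_of_dvd d (by exact ⟨2 ^ n, by ring⟩)]
    have hdiv : PySem.Int.mod (d >>> (1:Nat)) (2 ^ n) = PySem.Int.mod (r >>> (1:Nat)) (2 ^ n) := by
      rw [PySem.Int.mod_eq_emod_of_pos hk, PySem.Int.mod_eq_emod_of_pos hk,
        shiftRight_one_int, shiftRight_one_int, hre]
      have hd : 2 ^ (n+1) * (d / 2 ^ (n+1)) + d % 2 ^ (n+1) = d := Int.mul_ediv_add_emod d _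
      have h2 : d = d % 2 ^ (n+1) + (2 ^ n * (d / 2 ^ (n+1))) * 2 := by linear_combination -hd
      have hdd : d / 2 = d % 2 ^ (n+1) / 2 + 2 ^ n * (d / 2 ^ (n+1)) := by
        conv_lhs => rw [h2]
        rw [Int.add_mul_ediv_right _ _ two_ne_zero]
      rw [hdd, Int.add_mul_emod_self_left]
    rw [binI, binI, hmod2, ih (d >>> (1:Nat)), hdiv, ← ih (r >>> (1:Nat))]

theorem aLoop_eq (n : Nat) : ∀ (d : Int) (s : List Char),
    dectobin_SDI_loop n d s = (binI n d).flatMap (fun c => [c, c]) ++ s := by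
  induction n with
  | zero => intro d s; rfl
  | succ n ih =>
    intro d s
    have e0 : PySem.Int.toChars 0 = ['0'] := by decide
    have e1 : PySem.Int.toChars 1 = ['1'] := by decide
    have h2 : d % 2 = 0 ∨ d % 2 = 1 := by omega
    rcases h2 with h | h <;>
      rw [dectobin_SDI_loop, binI, List.flatMap_append, ih] <;>
      simp [h, e0, e1] <;> decide

theorem binGo_mem : ∀ (m : Nat), ∀ c ∈ binGo m, c = '0' ∨ c = '1' := by
  intro m
  induction m using Nat.strong_induction_on with
  | _ m ih =>
    intro c hc
    rw [binGo] at hc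
    split_ifs at hc with h
    · interval_cases m <;> simp at hc <;> subst hc <;> decide
    · rw [List.mem_append] at hc
      rcases hc with hc | hc
      · exact ih (m / 2) (by omega) c hc
      · simp at hc
        have h2 : m % 2 = 0 ∨ m % 2 = 1 := by omega
        rcases h2 with h2 | h2 <;> rw [h2] at hc <;> subst hc <;> decide

theorem binI_natCast (n : Nat) : ∀ (m : Nat), m < 2 ^ n →
    binI n (m : Int) = List.replicate (n - (if m = 0 then [] else binGo m).length) '0'
      ++ (if m = 0 then [] else binGo m) := by
  induction n with
  | zero =>
    intro m hm
    interval_cases m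
    simp [binI]
  | succ n ih =>
    intro m hm
    have hsh : (m : Int) >>> (1:Nat) = ((m / 2 : Nat) : Int) := by
      rw [shiftRight_one_int]
      exact_mod_cast (Int.natCast_ediv m 2).symm
    have hmod : (PySem.Int.mod (m : Int) 2).toNat = m % 2 := by
      rw [PySem.Int.mod_eq_emod_of_pos (by omega)]
      omega
    rw [binI, hsh, hmod, ih (m / 2) (by omega)]
    by_cases h0 : m = 0
    · subst h0
      have e : Nat.digitChar (0 % 2) = '0' := by decide
      simp [e, List.replicate_succ']
    · by_cases h1 : m = 1
      · subst h1
        have e : binGo 1 = ['1'] := by rw [binGo]; rw [if_pos (by norm_num)]; decide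
        have e1 : Nat.digitChar (1 % 2) = '1' := by decide
        simp [e, e1]
      · have hge : ¬ m < 2 := by omega
        have hd0 : ¬ m / 2 = 0 := by omega
        conv_rhs => rw [binGo]
        simp only [h0, hd0, hge, if_false]
        have hlen : (binGo (m / 2) ++ [Nat.digitChar (m % 2)]).length
            = (binGo (m / 2)).length + 1 := by simp
        rw [hlen]
        have hsub : n + 1 - ((binGo (m / 2)).length + 1) = n - (binGo (m / 2)).length := by omega
        rw [hsub, List.append_assoc]

theorem zfill_eq (c : Char) (rest : List Char) (w : Int)
    (h1 : c ≠ '+') (h2 : c ≠ '-') :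
    PySem.Chars.zfill (c :: rest) w = List.replicate (w.toNat - (c :: rest).length) '0' ++ (c :: rest) := by
  rw [PySem.Chars.zfill]
  by_cases hw : w ≤ ((c :: rest).length : Int)
  · rw [if_pos hw]
    have hz : w.toNat - (c :: rest).length = 0 := by omega
    rw [hz]
    simp
  · rw [if_neg hw]
    have : ¬ (c = '+' ∨ c = '-') := by tauto
    simp only [this, if_false]

theorem binGo_cons (m : Nat) : ∃ c rest, binGo m = c :: rest ∧ c ≠ '+' ∧ c ≠ '-' := by
  have hne : binGo m ≠ [] := by
    rw [binGo]
    split_ifs <;> simp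
  obtain ⟨c, rest, hcr⟩ := List.exists_cons_of_ne_nil hne
  have hc : c ∈ binGo m := by rw [hcr]; exact List.mem_cons_self
  rcases binGo_mem m c hc with h | h <;> exact ⟨c, rest, hcr, by subst h; decide, by subst h; decide⟩

theorem main_eq (dec : Int) (bits : Int) : dectobin_SDI dec bits = dectobin_SDI_alt dec bits := by
  by_cases hb : bits ≤ 0
  · have h0 : bits.toNat = 0 := by omega
    rw [dectobin_SDI, dectobin_SDI_alt, if_pos hb, h0]
    rfl
  · obtain ⟨n, hn1, hbn⟩ : ∃ n : Nat, 1 ≤ n ∧ bits = (n : Int) := ⟨bits.toNat, by omega, by omega⟩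
    have hbt : bits.toNat = n := by omega
    rw [dectobin_SDI, dectobin_SDI_alt, if_neg hb, hbt]
    have hsl : (1 : Int) <<< n = 2 ^ n := by simp [Int.shiftLeft_eq]
    rw [hsl]
    have hpos : (0:Int) < 2 ^ n := by positivity
    obtain ⟨m, hmeq⟩ : ∃ m : Nat, PySem.Int.mod dec (2 ^ n) = (m : Int) :=
      ⟨(PySem.Int.mod dec (2 ^ n)).toNat, by have := PySem.Int.mod_nonneg dec hpos; omega⟩
    have hmlt := PySem.Int.mod_lt dec hpos
    have hmn : m < 2 ^ n := by
      rw [hmeq] at hmlt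
      exact_mod_cast hmlt
    have hbin : PySem.Int.toBinChars (PySem.Int.mod dec (2 ^ n)) = binGo m := by
      rw [hmeq, PySem.Int.toBinChars, if_neg (by omega)]
      rw [show ((m : Int)).toNat = m by omega, toDigits_two_eq_binGo]
    have key : PySem.Chars.zfill (PySem.Int.toBinChars (PySem.Int.mod dec (2 ^ n))) bits = binI n dec := by
      rw [hbin, binI_mod n dec, hmeq, binI_natCast n m hmn]
      obtain ⟨c, rest, hcr, hcp, hcm⟩ := binGo_cons m
      rw [hcr, zfill_eq c rest bits hcp hcm, ← hcr]
      by_cases h0 : m = 0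
      · subst h0
        have e : binGo 0 = ['0'] := by rw [binGo]; rw [if_pos (by norm_num)]; decide
        rw [e]
        have h1 : bits.toNat - 1 = n - 1 := by omega
        have h2 : n = (n - 1) + 1 := by omega
        simp [h1]
        conv_rhs => rw [h2]
        rw [List.replicate_succ']
      · simp only [h0, if_false]
        rw [hbt]
    rw [key, aLoop_eq, List.append_nil]

-- ===== VERDICT (by name: the statement is the Claim_ definition above) =====
theorem dectobin_SDI_spec : Claim_equal_dectobin_SDI := by
  intro dec bits _
  unfold Spec_dectobin_SDI
  exact main_eq dec bits
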